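-- pv_equiv track=rewrite | github.com/diegoufba/Sport-scheduling-carry-over | geradores/circle.py | circle_method
-- ===== SOURCE A (Python) =====
-- def circle_method(n):
--
--     def schedule_function(t,r):
--         if t == n:
--             return r
--         if t == r:
--             return n
--         equation = (2*r-t) % (n-1)
--         if equation == 0:
--             return n-1
--         else:
--             return equation
--
--     schedule = []
--
--     for t in range(1,n+1):
--         schedule.append([schedule_function(t,r)-1 for r in range(1,n)])
--
--     # def desenhaGrafo(r):
--     #     G = nx.Graph()
--     #     G.add_nodes_from(range(1,n+1))
--     #     for t in range(1,n+1):
--     #         G.add_edge(t,schedule[t-1][r-1])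
--     #     nx.draw(G, pos=nx.circular_layout(G), with_labels=True)
--     #     plt.show()
--
--
--     return schedule
-- ===== SOURCE B (Python) =====
-- def circle_method(n):
--     # Literal circle method: pivot n, rotate the circle of the other n-1 teams
--     # one step per round; each round's pairings are collected into a dict and
--     # read off as a column, then the columns are transposed into the matrix.
--     m = n - 1
--     circle = list(range(1, n))
--     cols = []
--     for _ in range(m):
--         top = circle[0]
--         opp = {top: n, n: top}
--         for i in range(1, m):
--             opp[circle[i]] = circle[m - i]
--         cols.append([opp[t] - 1 for t in range(1, n + 1)])
--         circle = circle[1:] + [circle[0]]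
--     return [[col[j] for col in cols] for j in range(n)]
-- ===== Notes on version B (the rewrite author's own statement) =====
-- stated objective: alternative
-- what changed: Replaces the per-entry modular formula with the literal circle method: a rotating circle of the n-1 non-pivot teams, a per-round pairing dict {top: n, n: top, circle[i]: circle[m-i]} read off as a column, and a final transpose into the team-major matrix.
import Mathlib
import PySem

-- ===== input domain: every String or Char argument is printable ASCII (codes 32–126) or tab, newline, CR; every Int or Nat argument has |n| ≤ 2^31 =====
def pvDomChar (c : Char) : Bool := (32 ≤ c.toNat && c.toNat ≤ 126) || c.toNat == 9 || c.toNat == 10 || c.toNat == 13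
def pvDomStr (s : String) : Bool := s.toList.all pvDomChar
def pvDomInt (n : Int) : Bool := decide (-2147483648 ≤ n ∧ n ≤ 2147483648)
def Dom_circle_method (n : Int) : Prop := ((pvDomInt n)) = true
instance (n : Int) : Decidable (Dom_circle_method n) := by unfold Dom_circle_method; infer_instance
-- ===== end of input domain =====

-- B replaces the per-entry formula (2*r-t)%(n-1) with the literal circle method
-- (rotate a circle of n-1 teams, read one column per round, transpose); alternative
-- decomposition, not faster.

-- ===== PORT A =====
-- inner helper schedule_function(t, r) of A
def scheduleFunction (n t r : Int) : Int :=
  if t = n then r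
  else if t = r then n
  else
    let equation := PySem.Int.mod (2 * r - t) (n - 1)
    if equation = 0 then n - 1 else equation

def circle_method (n : Int) : List (List Int) :=
  (PySem.List.pyRange 1 (n + 1) 1).map (fun t =>
    (PySem.List.pyRange 1 n 1).map (fun r => scheduleFunction n t r - 1))

-- ===== PORT B =====
-- the dict `opp` B builds for one round: {top: n, n: top, circle[i]: circle[m-i] ...};
-- the circle[...] reads always succeed, so the `.getD 0` defaults are never taken
def colDict (n : Int) (circle : List Int) (top : Int) : PySem.Dict Int Int :=
  (PySem.List.pyRange 1 (n - 1) 1).foldl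
    (fun d i => d.insert ((PySem.List.pyGet? circle i).getD 0)
                         ((PySem.List.pyGet? circle ((n - 1) - i)).getD 0))
    ((PySem.Dict.empty.insert top n).insert n top)

-- one iteration of B's round loop: build the round's pairing dict, read the column
-- off it (opp[t] never misses, so the `.getD 0` default is never taken), rotate by one
def circleStep (n : Int) (st : List Int × List (List Int)) (_x : Int) : List Int × List (List Int) :=
  let circle := st.1
  let top := (PySem.List.pyGet? circle 0).getD 0
  let col := (PySem.List.pyRange 1 (n + 1) 1).map
    (fun t => ((colDict n circle top).get? t).getD 0 - 1)
  (circle.drop 1 ++ [(PySem.List.pyGet? circle 0).getD 0], st.2 ++ [col])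

def circle_method_alt (n : Int) : List (List Int) :=
  let st := (PySem.List.pyRange 0 (n - 1) 1).foldl (circleStep n) (PySem.List.pyRange 1 n 1, [])
  (PySem.List.pyRange 0 n 1).map (fun j =>
    st.2.map (fun col => (PySem.List.pyGet? col j).getD 0))

-- ===== PRECONDITION & SPEC =====
def Spec_circle_method (n : Int) (out : List (List Int)) : Prop := out = circle_method_alt n
instance (n : Int) (out : List (List Int)) : Decidable (Spec_circle_method n out) := by unfold Spec_circle_method; infer_instance

-- ===== CLAIM (what is proved, stated in full; the proofs are below) =====
def Claim_equal_circle_method : Prop := ∀ (n : Int), Dom_circle_method n → Spec_circle_method n (circle_method n)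

-- ===== LEMMAS AND PROOFS =====
-- rotated circle after k left-rotations of [1..M] (proof-only description)
def rotC (M k : Nat) : List Int :=
  (List.range M).map (fun i => (((k + i) % M : Nat) : Int) + 1)

-- the column B computes in round k (proof-only description)
def colF (n : Int) (M k : Nat) : List Int :=
  (PySem.List.pyRange 1 (n + 1) 1).map
    (fun t => ((colDict n (rotC M k) ((PySem.List.pyGet? (rotC M k) 0).getD 0)).get? t).getD 0 - 1)

lemma rotC_length (M k : Nat) : (rotC M k).length = M := by simp [rotC]

lemma rotC_getElem (M k i : Nat) (h : i < M) :
    (rotC M k)[i]'(by simpa [rotC] using h) = (((k + i) % M : Nat) : Int) + 1 := by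
  simp [rotC]

lemma rotC_get0 (M k : Nat) (hM : 0 < M) :
    (PySem.List.pyGet? (rotC M k) 0).getD 0 = ((k % M : Nat) : Int) + 1 := by
  rw [PySem.List.pyGet?_zero, List.getElem?_eq_getElem (by simpa [rotC_length] using hM)]
  simp [rotC_getElem M k 0 hM]

lemma mod_cases (a M : Nat) (h : a < 2 * M) : a % M = if a < M then a else a - M := by
  split_ifs with h1
  · exact Nat.mod_eq_of_lt h1
  · have ha : a = M + (a - M) := by omega
    conv_lhs => rw [ha]
    rw [Nat.add_mod_left, Nat.mod_eq_of_lt (by omega)]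

lemma emod_cases (x M : Int) (_hM : 0 < M) (h1 : -M ≤ x) (h2 : x < 2 * M) :
    x % M = if x < 0 then x + M else if x < M then x else x - M := by
  split_ifs with c1 c2
  · rw [Int.emod_eq_add_self_emod, Int.emod_eq_of_lt (by omega) (by omega)]
  · exact Int.emod_eq_of_lt (by omega) c2
  · rw [← Int.sub_emod_right, Int.emod_eq_of_lt (by omega) (by omega)]

lemma rotC_step (M k : Nat) (hM : 0 < M) :
    (rotC M k).drop 1 ++ [(PySem.List.pyGet? (rotC M k) 0).getD 0] = rotC M (k + 1) := by
  rw [rotC_get0 M k hM]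
  apply List.ext_getElem
  · simp [rotC_length]; omega
  · intro i h1 h2
    rw [rotC_getElem M (k+1) i (by simpa [rotC_length] using h2)]
    by_cases hi : i < M - 1
    · rw [List.getElem_append_left (by simp [rotC_length]; omega), List.getElem_drop]
      have e : k + (1 + i) = k + 1 + i := by omega
      rw [rotC_getElem M k (1 + i) (by omega), e]
    · have hie : i = M - 1 := by simp [rotC_length] at h1; omega
      rw [List.getElem_append_right (by simp [rotC_length]; omega)]
      have h0 : i - ((rotC M k).drop 1).length = 0 := by simp [rotC_length]; omega
      simp only [h0, List.getElem_singleton]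
      have e : k + 1 + i = k + M := by omega
      rw [e, Nat.add_mod_right]

lemma core_entry (n : Int) (M : Nat) (hM : (M : Int) = n - 1) (hM0 : 0 < M)
    (j k : Nat) (hj : (j : Int) < n) (hk : k < M) :
    ((colDict n (rotC M k) ((PySem.List.pyGet? (rotC M k) 0).getD 0)).get? (1 + (j : Int))).getD 0
      = scheduleFunction n (1 + (j : Int)) (1 + (k : Int)) := by
  rw [rotC_get0 M k hM0, Nat.mod_eq_of_lt hk]
  have htopn : ((k : Int) + 1) ≠ n := by omega
  have hkey : ∀ i : Int, 1 ≤ i → i < (M : Int) →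
      (PySem.List.pyGet? (rotC M k) i).getD 0 = (((k + i.toNat) % M : Nat) : Int) + 1 := by
    intro i h1 h2
    have hi : i = (i.toNat : Int) := by omega
    rw [hi, PySem.List.pyGet?_natCast,
        List.getElem?_eq_getElem (by rw [rotC_length]; omega),
        rotC_getElem M k _ (by omega)]
    simp
  have hval : ∀ i : Int, 1 ≤ i → i < (M : Int) →
      (PySem.List.pyGet? (rotC M k) ((n - 1) - i)).getD 0
        = (((k + (M - i.toNat)) % M : Nat) : Int) + 1 := by
    intro i h1 h2
    have hi : (n - 1) - i = ((M - i.toNat : Nat) : Int) := by omega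
    rw [hi, PySem.List.pyGet?_natCast,
        List.getElem?_eq_getElem (by rw [rotC_length]; omega),
        rotC_getElem M k _ (by omega)]
    simp
  have hinj : ∀ i1 i2 : Nat, i1 < M → i2 < M → (k + i1) % M = (k + i2) % M → i1 = i2 := by
    intro i1 i2 h1 h2 h
    rw [mod_cases _ _ (by omega), mod_cases _ _ (by omega)] at h
    split_ifs at h <;> omega
  have hmodlt : ∀ i : Nat, (k + i) % M < M := fun i => Nat.mod_lt _ (by omega)
  have hfresh : ∀ i ∈ PySem.List.pyRange 1 (n - 1) 1,
      (((PySem.Dict.empty.insert ((k : Int) + 1) n).insert n ((k : Int) + 1)).contains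
        ((PySem.List.pyGet? (rotC M k) i).getD 0)) = false := by
    intro i hi
    rw [PySem.List.mem_pyRange_one] at hi
    rw [hkey i hi.1 (by omega)]
    have h1 : (((k + i.toNat) % M : Nat) : Int) + 1 ≠ n := by
      have := hmodlt i.toNat; omega
    have h2 : (((k + i.toNat) % M : Nat) : Int) + 1 ≠ (k : Int) + 1 := by
      intro hcon
      have he : (k + i.toNat) % M = k := by omega
      have hk0 : (k + 0) % M = k := by rw [Nat.add_zero, Nat.mod_eq_of_lt hk]
      have := hinj i.toNat 0 (by omega) (by omega) (by rw [he, hk0])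
      omega
    simp only [PySem.Dict.contains_insert, PySem.Dict.contains_empty, Bool.or_false,
               Bool.or_eq_false_iff, beq_eq_false_iff_ne, ne_eq]
    exact ⟨h1, h2⟩
  have hnodupmap : ((PySem.List.pyRange 1 (n - 1) 1).map
      (fun i => (PySem.List.pyGet? (rotC M k) i).getD 0)).Nodup := by
    refine List.Nodup.map_on ?_ (PySem.List.nodup_pyRange_one 1 (n - 1))
    intro x hx y hy hxy
    rw [PySem.List.mem_pyRange_one] at hx hy
    rw [hkey x hx.1 (by omega), hkey y hy.1 (by omega)] at hxy
    have : (k + x.toNat) % M = (k + y.toNat) % M := by omega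
    have := hinj x.toNat y.toNat (by omega) (by omega) this
    omega
  have hitems : (colDict n (rotC M k) ((k : Int) + 1)).items
      = [(((k : Int) + 1), n), (n, ((k : Int) + 1))]
        ++ (PySem.List.pyRange 1 (n - 1) 1).map
            (fun i => ((PySem.List.pyGet? (rotC M k) i).getD 0,
                       (PySem.List.pyGet? (rotC M k) ((n - 1) - i)).getD 0)) := by
    unfold colDict
    rw [PySem.Dict.items_foldl_insert_fresh (PySem.List.pyRange 1 (n - 1) 1)
          (fun i => (PySem.List.pyGet? (rotC M k) i).getD 0)
          (fun i => (PySem.List.pyGet? (rotC M k) ((n - 1) - i)).getD 0)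
          ((PySem.Dict.empty.insert ((k : Int) + 1) n).insert n ((k : Int) + 1))
          hfresh hnodupmap]
    congr 1
    simp [PySem.Dict.items_insert, PySem.Dict.contains_insert, PySem.Dict.contains_empty,
          Ne.symm htopn]
    rfl
  have hnodupkeys : (colDict n (rotC M k) ((k : Int) + 1)).keys.Nodup := by
    show ((colDict n (rotC M k) ((k : Int) + 1)).items.map Prod.fst).Nodup
    rw [hitems, List.map_append, List.nodup_append]
    refine ⟨by simp [htopn], by simpa [List.map_map, Function.comp_def] using hnodupmap, ?_⟩
    intro a ha b hb hab
    simp only [List.map_cons, List.map_nil, List.mem_cons, List.not_mem_nil, or_false] at ha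
    rw [List.map_map, List.mem_map] at hb
    obtain ⟨i, hi, hib⟩ := hb
    simp only [Function.comp_apply] at hib
    rw [PySem.List.mem_pyRange_one] at hi
    rw [hkey i hi.1 (by omega)] at hib
    subst hab
    rcases ha with ha | ha
    · subst ha
      have h2 := hmodlt i.toNat
      have he : (k + i.toNat) % M = k := by omega
      have hk0 : (k + 0) % M = k := by rw [Nat.add_zero, Nat.mod_eq_of_lt hk]
      have := hinj i.toNat 0 (by omega) (by omega) (by rw [he, hk0])
      omega
    · subst ha
      have h2 := hmodlt i.toNat
      omega
  by_cases ht : (1 + (j : Int)) = n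
  · have hmem : ((n : Int), ((k : Int) + 1)) ∈ (colDict n (rotC M k) ((k : Int) + 1)).items := by
      rw [hitems]; simp
    rw [ht, PySem.Dict.get?_of_mem_items _ hmem hnodupkeys]
    rw [scheduleFunction, if_pos rfl]
    simp
    omega
  · have hjM : j < M := by omega
    rw [scheduleFunction, if_neg ht]
    set i0 := (M + j - k) % M with hi0def
    have hi0lt : i0 < M := Nat.mod_lt _ (by omega)
    have hi0val : i0 = if k ≤ j then j - k else M + j - k := by
      rw [hi0def, mod_cases _ _ (by omega)]; split_ifs <;> omega
    by_cases hjk : j = k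
    · -- t = top: the entry (top, n)
      have hmem : (((k : Int) + 1), (n : Int)) ∈ (colDict n (rotC M k) ((k : Int) + 1)).items := by
        rw [hitems]; simp
      have ht2 : (1 + (j : Int)) = (k : Int) + 1 := by omega
      rw [ht2, PySem.Dict.get?_of_mem_items _ hmem hnodupkeys, if_pos (by omega)]
      simp
    · have h0 : i0 ≠ 0 := by rw [hi0val]; split_ifs <;> omega
      have hkeyi0 : (PySem.List.pyGet? (rotC M k) ((i0 : Nat) : Int)).getD 0 = 1 + (j : Int) := by
        rw [hkey ((i0 : Nat) : Int) (by omega) (by omega)]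
        have e : ((i0 : Nat) : Int).toNat = i0 := by omega
        rw [e]
        have : (k + i0) % M = j := by
          rw [hi0val]; split_ifs with h
          · rw [Nat.mod_eq_of_lt (by omega)]; omega
          · have e2 : k + (M + j - k) = M + j := by omega
            rw [e2, Nat.add_mod_left, Nat.mod_eq_of_lt (by omega)]
        rw [this]; ring
      have hmem : ((1 + (j : Int)), (((k + (M - i0)) % M : Nat) : Int) + 1)
          ∈ (colDict n (rotC M k) ((k : Int) + 1)).items := by
        rw [hitems]
        refine List.mem_append_right _ ?_
        rw [List.mem_map]
        refine ⟨((i0 : Nat) : Int), ?_, ?_⟩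
        · rw [PySem.List.mem_pyRange_one]; omega
        · rw [hkeyi0, hval ((i0 : Nat) : Int) (by omega) (by omega)]
          have e : ((i0 : Nat) : Int).toNat = i0 := by omega
          rw [e]
      rw [PySem.Dict.get?_of_mem_items _ hmem hnodupkeys, if_neg (by omega)]
      simp only [Option.getD_some]
      rw [PySem.Int.mod_eq_emod_of_pos (by omega)]
      have e2 : 2 * (1 + (k : Int)) - (1 + (j : Int)) = 1 + 2 * k - j := by ring
      rw [e2]
      rw [emod_cases (1 + 2 * (k : Int) - (j : Int)) (n - 1) (by omega) (by omega) (by omega)]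
      rw [mod_cases (k + (M - i0)) M (by omega)]
      by_cases hkj : k ≤ j
      · rw [if_pos hkj] at hi0val
        split_ifs <;> omega
      · rw [if_neg hkj] at hi0val
        split_ifs <;> omega

lemma rotC_zero_eq (n : Int) (M : Nat) (hM : (M : Int) = n - 1) :
    PySem.List.pyRange 1 n 1 = rotC M 0 := by
  rw [PySem.List.pyRange_one]
  have e : (n - 1).toNat = M := by omega
  rw [e, rotC]
  apply List.map_congr_left
  intro i hi
  rw [List.mem_range] at hi
  rw [Nat.zero_add, Nat.mod_eq_of_lt hi]
  ring

lemma fold_inv (n : Int) (M : Nat) (hM0 : 0 < M) (l : List Int) :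
    ∀ (k : Nat) (acc : List (List Int)),
    l.foldl (circleStep n) (rotC M k, acc)
    = (rotC M (k + l.length), acc ++ (List.range l.length).map (fun j => colF n M (k + j))) := by
  induction l with
  | nil => intro k acc; simp
  | cons x l ih =>
    intro k acc
    rw [List.foldl_cons]
    have hstep : circleStep n (rotC M k, acc) x = (rotC M (k + 1), acc ++ [colF n M k]) := by
      simp only [circleStep]
      rw [rotC_step M k hM0]
      rfl
    rw [hstep, ih (k + 1)]
    have e1 : k + 1 + l.length = k + (x :: l).length := by simp; omega
    rw [e1]
    have e2 : acc ++ [colF n M k] ++ (List.range l.length).map (fun j => colF n M (k + 1 + j))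
        = acc ++ (List.range (x :: l).length).map (fun j => colF n M (k + j)) := by
      rw [List.append_assoc]
      refine congrArg (acc ++ ·) ?_
      rw [List.length_cons, List.range_succ_eq_map, List.map_cons, List.map_map,
          List.singleton_append]
      refine congrArg₂ List.cons (by norm_num) ?_
      apply List.map_congr_left
      intro a _
      simp only [Function.comp_apply, Nat.succ_eq_add_one]
      exact congrArg (colF n M) (by omega)
    rw [e2]

lemma alt_ge_two (n : Int) (hn : 2 ≤ n) : circle_method n = circle_method_alt n := by
  have hM : ((n - 1).toNat : Int) = n - 1 := Int.toNat_of_nonneg (by omega)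
  set M := (n - 1).toNat with hMdef
  have hM0 : 0 < M := by omega
  have halt : circle_method_alt n =
      (PySem.List.pyRange 0 n 1).map (fun j =>
        ((List.range M).map (fun k => colF n M k)).map
          (fun col => (PySem.List.pyGet? col j).getD 0)) := by
    unfold circle_method_alt
    simp only []
    rw [rotC_zero_eq n M hM]
    rw [fold_inv n M hM0 _ 0 []]
    have hlen2 : (PySem.List.pyRange 0 (n - 1) 1).length = M := by
      rw [PySem.List.length_pyRange_one]; omega
    rw [hlen2]
    simp
  rw [halt]
  unfold circle_method
  rw [PySem.List.pyRange_one 1 (n + 1), PySem.List.pyRange_one 0 n]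
  have e0 : (n + 1 - 1).toNat = n.toNat := by omega
  have e1 : (n - 0).toNat = n.toNat := by omega
  rw [e0, e1, List.map_map, List.map_map]
  apply List.map_congr_left
  intro j hj
  rw [List.mem_range] at hj
  simp only [Function.comp_apply]
  rw [List.map_map, PySem.List.pyRange_one 1 n, ← hMdef, List.map_map]
  apply List.map_congr_left
  intro k hk
  rw [List.mem_range] at hk
  simp only [Function.comp_apply]
  have hcol : (PySem.List.pyGet? (colF n M k) ((0 : Int) + (j : Int))).getD 0
      = ((colDict n (rotC M k) ((PySem.List.pyGet? (rotC M k) 0).getD 0)).get? (1 + (j : Int))).getD 0 - 1 := by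
    rw [zero_add, colF, PySem.List.pyGet?_natCast, List.getElem?_map,
        List.getElem?_eq_getElem (by rw [PySem.List.length_pyRange_one]; omega)]
    rw [PySem.List.getElem_pyRange_one]
    simp
  rw [hcol, core_entry n M hM hM0 j k (by omega) hk]

lemma alt_nonpos (n : Int) (hn : n ≤ 0) : circle_method n = circle_method_alt n := by
  unfold circle_method circle_method_alt
  rw [PySem.List.pyRange_one_eq_nil (by omega : n + 1 ≤ 1),
      PySem.List.pyRange_one_eq_nil (by omega : n ≤ 0)]
  simp

lemma alt_one : circle_method 1 = circle_method_alt 1 := by decide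

-- ===== VERDICT (by name: the statement is the Claim_ definition above) =====
theorem circle_method_spec : Claim_equal_circle_method := by
  intro n _
  unfold Spec_circle_method
  by_cases h0 : n ≤ 0
  · exact alt_nonpos n h0
  · by_cases h1 : n = 1
    · rw [h1]; exact alt_one
    · exact alt_ge_two n (by omega)
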